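-- pv_equiv track=rewrite | github.com/desarrollo-nwl/gogo | analisis/grafos.py | GrafoTotal
-- ===== SOURCE A (Python) =====
-- def BolsaEdges(v,bolsa):
-- 	n = 0
-- 	if len(v)==2:
-- 		bolsa.append(v)
-- 	else:
-- 		for i in range(len(v)-1):
-- 			bolsa.append([v[i],v[len(v)-1]])
-- 		BolsaEdges(v[0:len(v)-1],bolsa)
--
-- 	return bolsa
--
-- def Nodos(v):
-- 	nodos = []
-- 	for i in range(len(v)):
-- 		if v[i]==1:
-- 			nodos.append(i)
-- 	return nodos
--
-- def hacerConexion(G,nodo1,nodo2):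
-- 	if nodo1 not in G:
-- 		G[nodo1] = {}
--
-- 	if nodo2 not in G[nodo1]:
-- 		G[nodo1][nodo2]=1
-- 	else:
-- 		G[nodo1][nodo2]+=1
--
-- 	if nodo2 not in G:
-- 		G[nodo2]={}
--
-- 	if nodo1 not in G[nodo2]:
-- 		G[nodo2][nodo1]=1
-- 	else:
-- 		G[nodo2][nodo1]+=1
--
-- def ConstrucGrafo(graph,frase):
-- 	for elemento in frase:
-- 		hacerConexion(graph,elemento[0],elemento[1])
--
-- def GrafoTotal(graph,dataset):   ###graph = {} , dataset = [[1,0,1,0,1,1,0],[0,0,1,0,1,1]....]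
-- 	var = []
-- 	var2 = []
-- 	for frase1 in dataset:
-- 		var.append(Nodos(frase1))
--
-- 	for frase2 in var:
-- 		if len(frase2)>1:
-- 			var2.append(BolsaEdges(frase2,[]))
--
-- 	for frase3 in var2:
-- 		ConstrucGrafo(graph,frase3)
--
-- 	return graph
-- ===== SOURCE B (Python) =====
-- def _bump(graph, a, b):
--     d = graph.setdefault(a, {})
--     d[b] = d.get(b, 0) + 1
--
-- def GrafoTotal(graph, dataset):
--     for row in dataset:
--         nodes = [i for i, x in enumerate(row) if x == 1]
--         for j in range(len(nodes) - 1, 0, -1):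
--             for i in range(j):
--                 _bump(graph, nodes[i], nodes[j])
--                 _bump(graph, nodes[j], nodes[i])
--     return graph
-- ===== Notes on version B (the rewrite author's own statement) =====
-- stated objective: simpler
-- what changed: B replaces A's three-stage pipeline (build all node lists, build per-row pair bags via the recursive BolsaEdges, then fold them into the graph) by a single pass over the dataset that enumerates each row's unordered index pairs directly with two nested loops and increments the two symmetric counters on the spot, with no recursion and no intermediate lists.
import Mathlib
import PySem

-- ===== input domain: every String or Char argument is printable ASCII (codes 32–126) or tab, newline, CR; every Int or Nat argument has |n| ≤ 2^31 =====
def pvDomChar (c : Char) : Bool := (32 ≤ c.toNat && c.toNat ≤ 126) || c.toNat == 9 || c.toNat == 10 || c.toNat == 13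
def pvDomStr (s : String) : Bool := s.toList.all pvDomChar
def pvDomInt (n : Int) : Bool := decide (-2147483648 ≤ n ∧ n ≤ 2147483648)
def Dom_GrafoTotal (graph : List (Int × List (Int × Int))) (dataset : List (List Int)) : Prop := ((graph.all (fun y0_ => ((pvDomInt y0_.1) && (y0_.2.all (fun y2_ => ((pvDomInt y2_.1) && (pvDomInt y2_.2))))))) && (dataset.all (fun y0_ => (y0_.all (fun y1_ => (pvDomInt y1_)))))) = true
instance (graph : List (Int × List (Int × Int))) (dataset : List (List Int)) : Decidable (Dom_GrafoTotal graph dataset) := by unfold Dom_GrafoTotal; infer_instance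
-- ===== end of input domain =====

-- B merges A's three stages (per-row node lists, recursive BolsaEdges pair bags, graph build)
-- into one pass that enumerates the unordered index pairs of each row directly; simpler, no
-- intermediate lists and no recursion. Return-value equivalence; both mutate `graph` in Python.


-- Shared representation plumbing: the Python dict-of-dicts `graph` as a PySem.Dict of PySem.Dicts.
def pvWrap (graph : List (Int × List (Int × Int))) : PySem.Dict Int (PySem.Dict Int Int) :=
  PySem.Dict.mk (graph.map (fun p => (p.1, PySem.Dict.mk p.2)))
def pvUnwrap (G : PySem.Dict Int (PySem.Dict Int Int)) : List (Int × List (Int × Int)) :=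
  G.items.map (fun p => (p.1, p.2.items))

-- ===== PORT A =====
def NodosA (v : List Int) : List Int :=
  (PySem.List.pyRange 0 (PySem.List.len v) 1).foldl
    (fun nodos i => if PySem.List.pyGetD v i 0 == 1 then nodos ++ [i] else nodos) []

-- `fuel` only makes the Python recursion structural; GrafoTotal calls this with
-- fuel = v.length ≥ 2, on which the recursion ends after exactly v.length - 1 unfoldings.
def BolsaEdgesA : Nat → List Int → List (Int × Int) → List (Int × Int)
  | 0, _, bolsa => bolsa
  | fuel + 1, v, bolsa =>
    if PySem.List.len v = 2 then
      bolsa ++ [(PySem.List.pyGetD v 0 0, PySem.List.pyGetD v 1 0)]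
    else
      BolsaEdgesA fuel (PySem.List.slice v (some 0) (some (PySem.List.len v - 1)))
        ((PySem.List.pyRange 0 (PySem.List.len v - 1) 1).foldl
          (fun b i => b ++ [(PySem.List.pyGetD v i 0, PySem.List.pyGetD v (PySem.List.len v - 1) 0)]) bolsa)

def hacerConexionA (G : PySem.Dict Int (PySem.Dict Int Int)) (nodo1 nodo2 : Int) :
    PySem.Dict Int (PySem.Dict Int Int) :=
  let G := if G.contains nodo1 then G else G.insert nodo1 PySem.Dict.empty
  let g1 := G.getD nodo1 PySem.Dict.empty
  let G := G.insert nodo1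
    (if g1.contains nodo2 then g1.insert nodo2 (g1.getD nodo2 0 + 1) else g1.insert nodo2 1)
  let G := if G.contains nodo2 then G else G.insert nodo2 PySem.Dict.empty
  let g2 := G.getD nodo2 PySem.Dict.empty
  G.insert nodo2
    (if g2.contains nodo1 then g2.insert nodo1 (g2.getD nodo1 0 + 1) else g2.insert nodo1 1)

def ConstrucGrafoA (graph : PySem.Dict Int (PySem.Dict Int Int)) (frase : List (Int × Int)) :
    PySem.Dict Int (PySem.Dict Int Int) :=
  frase.foldl (fun G elemento => hacerConexionA G elemento.1 elemento.2) graph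

def GrafoTotal (graph : List (Int × List (Int × Int))) (dataset : List (List Int)) :
    List (Int × List (Int × Int)) :=
  let G := pvWrap graph
  let var := dataset.foldl (fun var frase1 => var ++ [NodosA frase1]) []
  let var2 := var.foldl
    (fun var2 frase2 => if 1 < PySem.List.len frase2 then var2 ++ [BolsaEdgesA frase2.length frase2 []] else var2) []
  pvUnwrap (var2.foldl (fun G frase3 => ConstrucGrafoA G frase3) G)

-- ===== PORT B =====
def pvBump (G : PySem.Dict Int (PySem.Dict Int Int)) (a b : Int) :
    PySem.Dict Int (PySem.Dict Int Int) :=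
  let G := G.setdefault a PySem.Dict.empty
  let d := G.getD a PySem.Dict.empty
  G.insert a (d.insert b (d.getD b 0 + 1))

def GrafoTotal_alt (graph : List (Int × List (Int × Int))) (dataset : List (List Int)) :
    List (Int × List (Int × Int)) :=
  pvUnwrap (dataset.foldl (fun G row =>
    let nodes := ((PySem.List.enumerate row).filter (fun p => p.2 == 1)).map Prod.fst
    (PySem.List.pyRange (PySem.List.len nodes - 1) 0 (-1)).foldl (fun G j =>
      (PySem.List.pyRange 0 j 1).foldl (fun G i =>
        pvBump (pvBump G (PySem.List.pyGetD nodes i 0) (PySem.List.pyGetD nodes j 0))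
          (PySem.List.pyGetD nodes j 0) (PySem.List.pyGetD nodes i 0)) G) G)
    (pvWrap graph))

-- ===== PRECONDITION & SPEC =====
-- Pre_ excludes association lists whose outer or inner key lists carry duplicate keys:
-- those represent no Python dict (a dict collapses duplicates before A ever runs).
def Pre_GrafoTotal (graph : List (Int × List (Int × Int))) (dataset : List (List Int)) : Prop :=
  (graph.map Prod.fst).Nodup ∧ ∀ p ∈ graph, (p.2.map Prod.fst).Nodup
instance (graph : List (Int × List (Int × Int))) (dataset : List (List Int)) : Decidable (Pre_GrafoTotal graph dataset) := by unfold Pre_GrafoTotal; infer_instance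

def pvWitness_GrafoTotal : (List (Int × List (Int × Int))) × List (List Int) :=
  ([(0, [(1, 2)]), (1, [(0, 2)])], [[1, 1, 0], [1, 0, 1]])

def Spec_GrafoTotal (graph : List (Int × List (Int × Int))) (dataset : List (List Int)) (out : List (Int × List (Int × Int))) : Prop := out = GrafoTotal_alt graph dataset
instance (graph : List (Int × List (Int × Int))) (dataset : List (List Int)) (out : List (Int × List (Int × Int))) : Decidable (Spec_GrafoTotal graph dataset out) := by unfold Spec_GrafoTotal; infer_instance

-- ===== CLAIM (what is proved, stated in full; the proofs are below) =====
def Claim_equal_GrafoTotal : Prop := ∀ (graph : List (Int × List (Int × Int))) (dataset : List (List Int)), Dom_GrafoTotal graph dataset → Pre_GrafoTotal graph dataset → Spec_GrafoTotal graph dataset (GrafoTotal graph dataset)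

-- ===== LEMMAS AND PROOFS =====

-- A's per-edge update (one hacerConexion call) is B's two symmetric _bump halves.
theorem pv_inner_eq (d : PySem.Dict Int Int) (b : Int) :
    (if d.contains b then d.insert b (d.getD b 0 + 1) else d.insert b 1) = d.insert b (d.getD b 0 + 1) := by
  by_cases h : d.contains b = true
  · simp [h]
  · simp only [Bool.not_eq_true] at h
    rw [if_neg (by simp [h]), PySem.Dict.getD_of_not_contains (h := h)]
    norm_num

theorem pv_setdefault_ite (G : PySem.Dict Int (PySem.Dict Int Int)) (a : Int) (v : PySem.Dict Int Int) :
    G.setdefault a v = if G.contains a then G else G.insert a v := by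
  by_cases h : G.contains a = true
  · simp [h, PySem.Dict.setdefault_of_contains]
  · simp only [Bool.not_eq_true] at h
    simp [h, PySem.Dict.setdefault_of_not_contains]

theorem pv_step_eq (G : PySem.Dict Int (PySem.Dict Int Int)) (a b : Int) :
    hacerConexionA G a b = pvBump (pvBump G a b) b a := by
  simp only [hacerConexionA, pvBump, pv_setdefault_ite, pv_inner_eq]

-- The edge list B walks for a given node list (flattened form of its two nested loops);
-- it is exactly the pair bag A's BolsaEdges builds.
def pvEdg (nodes : List Int) : List (Int × Int) :=
  (PySem.List.pyRange (PySem.List.len nodes - 1) 0 (-1)).flatMap (fun j =>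
    (PySem.List.pyRange 0 j 1).map (fun i =>
      (PySem.List.pyGetD nodes i 0, PySem.List.pyGetD nodes j 0)))

theorem pv_nodos_eq (row : List Int) :
    NodosA row = ((PySem.List.enumerate row).filter (fun p => p.2 == 1)).map Prod.fst := by
  unfold NodosA
  rw [PySem.List.foldl_append_if (p := fun i => PySem.List.pyGetD row i 0 == 1) (f := fun i => i),
    PySem.List.enumerate_eq_map_pyRange (d := 0), List.filter_map, List.map_map]
  simp [Function.comp_def]

theorem pv_bolsa_acc (fuel : Nat) : ∀ (v : List Int) (bolsa : List (Int × Int)),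
    BolsaEdgesA fuel v bolsa = bolsa ++ BolsaEdgesA fuel v [] := by
  induction fuel with
  | zero => intro v bolsa; simp [BolsaEdgesA]
  | succ fuel ih =>
    intro v bolsa
    simp only [BolsaEdgesA]
    split_ifs with h
    · simp
    · rw [PySem.List.foldl_append_singleton_eq_map, PySem.List.foldl_append_singleton_eq_map,
        ih _ (bolsa ++ _), ih _ (([] : List (Int × Int)) ++ _)]
      simp

theorem pv_getD_dropLast (v : List Int) (k : Int) (h0 : 0 ≤ k) (hk : k < (v.dropLast.length : Int)) :
    PySem.List.pyGetD v.dropLast k 0 = PySem.List.pyGetD v k 0 := by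
  have hk2 : k < ((v.length : Int)) := by simp at hk ⊢; omega
  rw [PySem.List.pyGetD_eq_getElem v.dropLast 0 h0 hk,
    PySem.List.pyGetD_eq_getElem v 0 h0 hk2]
  exact List.getElem_dropLast _

theorem pv_edg_peel (v : List Int) (m : Nat) (hv : v.length = m + 3) :
    (PySem.List.pyRange 0 ((m + 2 : Nat) : Int) 1).map
        (fun i => (PySem.List.pyGetD v i 0, PySem.List.pyGetD v ((m + 2 : Nat) : Int) 0)) ++
      pvEdg v.dropLast = pvEdg v := by
  have hdl : v.dropLast.length = m + 2 := by simp [hv]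
  have h1 : ((m + 2 : Nat) : Int) - 1 = ((m + 1 : Nat) : Int) := by push_cast; ring
  have h2 : ((m + 3 : Nat) : Int) - 1 = ((m + 2 : Nat) : Int) := by push_cast; ring
  conv_rhs => unfold pvEdg
  rw [PySem.List.len_eq, hv, h2,
    PySem.List.pyRange_neg_one_cons (show (0:Int) < ((m + 2 : Nat) : Int) by positivity),
    List.flatMap_cons]
  congr 1
  unfold pvEdg
  rw [PySem.List.len_eq, hdl, h1]
  refine List.flatMap_congr (fun j hj => ?_)
  have hj2 := (PySem.List.mem_pyRange_neg_one).1 hj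
  refine List.map_congr_left (fun i hi => ?_)
  have hi2 := (PySem.List.mem_pyRange_one).1 hi
  have hjlt : j < ((v.dropLast.length : Int)) := by rw [hdl]; push_cast at hj2 ⊢; omega
  have hilt : i < ((v.dropLast.length : Int)) := by omega
  rw [pv_getD_dropLast v i (by omega) hilt, pv_getD_dropLast v j (by omega) hjlt]

theorem pv_bolsa_edg (m : Nat) : ∀ v : List Int, v.length = m + 2 →
    BolsaEdgesA (m + 2) v [] = pvEdg v := by
  induction m with
  | zero =>
    intro v hv
    simp only [BolsaEdgesA, PySem.List.len_eq, hv]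
    norm_num
    unfold pvEdg
    rw [PySem.List.len_eq, hv]
    norm_num
    rw [(by decide : PySem.List.pyRange 1 0 (-1) = [1])]
    simp [(by decide : PySem.List.pyRange 0 1 1 = [0])]
  | succ m ih =>
    intro v hv
    have hlen : (PySem.List.len v : Int) = (m : Int) + 3 := by simp [hv]; ring
    have hne : PySem.List.len v ≠ 2 := by rw [hlen]; omega
    have hsub : (PySem.List.len v - 1 : Int) = ((m + 2 : Nat) : Int) := by rw [hlen]; push_cast; ring
    have hslice : PySem.List.slice v (some 0) (some (PySem.List.len v - 1)) = v.dropLast := by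
      rw [hsub, PySem.List.slice_zero_start, PySem.List.slice_to_natCast,
        List.dropLast_eq_take, hv]
      norm_num
    have hdl : v.dropLast.length = m + 2 := by simp [hv]
    rw [show m + 1 + 2 = (m + 2) + 1 from rfl]
    conv_lhs => rw [BolsaEdgesA]
    rw [if_neg hne, hslice, PySem.List.foldl_append_singleton_eq_map, List.nil_append,
      pv_bolsa_acc, ih _ hdl, hsub]
    exact pv_edg_peel v m (by omega)

theorem pv_bolsa_full (ns : List Int) (h : 2 ≤ ns.length) :
    BolsaEdgesA ns.length ns [] = pvEdg ns := by
  have h2 := pv_bolsa_edg (ns.length - 2) ns (by omega)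
  rwa [show ns.length - 2 + 2 = ns.length by omega] at h2

-- B's two nested loops over a node list are a fold of the two _bump halves over pvEdg.
theorem pv_row_eq (ns : List Int) (G : PySem.Dict Int (PySem.Dict Int Int)) :
    ConstrucGrafoA G (pvEdg ns) =
      (PySem.List.pyRange (PySem.List.len ns - 1) 0 (-1)).foldl (fun G j =>
        (PySem.List.pyRange 0 j 1).foldl (fun G i =>
          pvBump (pvBump G (PySem.List.pyGetD ns i 0) (PySem.List.pyGetD ns j 0))
            (PySem.List.pyGetD ns j 0) (PySem.List.pyGetD ns i 0)) G) G := by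
  unfold ConstrucGrafoA pvEdg
  rw [List.foldl_flatMap]
  simp only [List.foldl_map, pv_step_eq]

-- ===== VERDICT (by name: the statement is the Claim_ definition above) =====
theorem GrafoTotal_spec : Claim_equal_GrafoTotal := by
  intro graph dataset _ _
  unfold Spec_GrafoTotal GrafoTotal GrafoTotal_alt
  simp only []
  congr 1
  rw [PySem.List.foldl_append_singleton_eq_map, List.nil_append,
    PySem.List.foldl_append_ite (p := fun f => 1 < PySem.List.len f)
      (f := fun f => BolsaEdgesA f.length f []), List.nil_append,
    List.foldl_map, ← PySem.List.foldl_ite_eq_foldl_filter, List.foldl_map]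
  refine PySem.List.foldl_congr_mem _ _ _ _ (fun G row _ => ?_)
  rw [← pv_nodos_eq row]
  by_cases h : 2 ≤ (NodosA row).length
  · rw [if_pos (by simp; omega), ConstrucGrafoA, ← ConstrucGrafoA, pv_bolsa_full _ h, pv_row_eq]
  · rw [if_neg (by simp; omega),
      PySem.List.pyRange_neg_one_eq_nil (by simp; omega)]
    rfl
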